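-- pv_equiv track=rewrite | github.com/aewing05/AdventOfCode2018 | Day2SolutionPython.py | matching_position
-- ===== SOURCE A (Python) =====
-- def matching_position(s1, s2):
--     pos = -1
--     for i, (c1, c2) in enumerate(zip(s1, s2)):
--         if c1 != c2:
--             if pos != -1:
--                 return -1
--             else:
--                 pos = i
--     return pos
-- ===== SOURCE B (Python) =====
-- def _common_prefix_len(a, b):
--     k = 0
--     for x, y in zip(a, b):
--         if x != y:
--             break
--         k += 1
--     return k
--
-- def matching_position(s1, s2):
--     n = min(len(s1), len(s2))
--     a, b = s1[:n], s2[:n]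
--     p = _common_prefix_len(a, b)
--     if p == n:
--         return -1
--     q = _common_prefix_len(a[::-1], b[::-1])
--     return p if p + q == n - 1 else -1
-- ===== Notes on version B (the rewrite author's own statement) =====
-- stated objective: alternative
-- what changed: Replaces the single-pass sentinel loop over enumerate(zip(...)) with a prefix/suffix decomposition: truncate both strings to the common length n, compute the common-prefix length p and the common-suffix length q; there is exactly one mismatch iff p + q == n - 1, and then the answer is p.
import Mathlib
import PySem

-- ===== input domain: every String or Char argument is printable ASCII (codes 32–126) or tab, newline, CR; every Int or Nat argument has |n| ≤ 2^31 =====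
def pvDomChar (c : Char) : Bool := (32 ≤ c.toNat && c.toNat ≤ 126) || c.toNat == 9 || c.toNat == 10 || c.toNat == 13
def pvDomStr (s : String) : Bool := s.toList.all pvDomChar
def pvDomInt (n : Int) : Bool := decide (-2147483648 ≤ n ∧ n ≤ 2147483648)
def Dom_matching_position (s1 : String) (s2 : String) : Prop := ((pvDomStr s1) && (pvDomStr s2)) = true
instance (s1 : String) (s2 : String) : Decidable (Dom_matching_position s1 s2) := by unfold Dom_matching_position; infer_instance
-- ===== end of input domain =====

-- B replaces A's early-exiting sentinel loop by a prefix/suffix decomposition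
-- (common-prefix length p, common-suffix length q; unique mismatch iff p + q = n - 1);
-- same cost (objective: alternative).

-- ===== PORT A =====
-- A's loop over enumerate(zip(s1,s2)) with accumulator pos and early return.
def pvGoA : List (Int × (Char × Char)) → Int → Int
  | [], pos => pos
  | (i, (c1, c2)) :: rest, pos =>
    if c1 ≠ c2 then
      if pos ≠ -1 then -1 else pvGoA rest i
    else pvGoA rest pos

def matching_position (s1 : String) (s2 : String) : Int :=
  pvGoA (PySem.List.enumerate (s1.toList.zip s2.toList) 0) (-1)

-- ===== PORT B =====
-- _common_prefix_len: Source B's counting for-loop over zip(a,b) with break, as the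
-- obvious structural recursion over the two lists.
def pvCPL : List Char → List Char → Nat
  | x :: xs, y :: ys => if x ≠ y then 0 else pvCPL xs ys + 1
  | _, _ => 0

-- Source B: n = min(len,len); a, b = s1[:n], s2[:n] (n is in range, so the slices are
-- takes); a[::-1] is List.reverse; `p + q == n - 1` is Python int arithmetic (Int).
def matching_position_alt (s1 : String) (s2 : String) : Int :=
  let n := min s1.toList.length s2.toList.length
  let a := s1.toList.take n
  let b := s2.toList.take n
  let p := pvCPL a b
  if p = n then -1
  else
    let q := pvCPL a.reverse b.reverse
    if (p : Int) + (q : Int) = (n : Int) - 1 then (p : Int) else -1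

-- ===== PRECONDITION & SPEC =====
def Spec_matching_position (s1 : String) (s2 : String) (out : Int) : Prop := out = matching_position_alt s1 s2
instance (s1 : String) (s2 : String) (out : Int) : Decidable (Spec_matching_position s1 s2 out) := by unfold Spec_matching_position; infer_instance

-- ===== CLAIM (what is proved, stated in full; the proofs are below) =====
def Claim_equal_matching_position : Prop := ∀ (s1 : String) (s2 : String), Dom_matching_position s1 s2 → Spec_matching_position s1 s2 (matching_position s1 s2)

-- ===== LEMMAS AND PROOFS =====

-- proof-only helper: the list of differing indices, counting from s
def pvDiffs : List (Char × Char) → Int → List Int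
  | [], _ => []
  | (c1, c2) :: r, s => if c1 ≠ c2 then s :: pvDiffs r (s + 1) else pvDiffs r (s + 1)

-- proof-only helper: common-prefix length of a list of pairs
def pvPref : List (Char × Char) → Nat
  | [] => 0
  | (c1, c2) :: r => if c1 ≠ c2 then 0 else pvPref r + 1

-- the "unique differing index" value, offset s: both ports compute this
def pvDForm (ps : List (Char × Char)) (s : Int) : Int :=
  if (pvDiffs ps s).length = 1 then (pvDiffs ps s).headD (-1) else -1

theorem pvCPL_zip (xs ys : List Char) : pvCPL xs ys = pvPref (xs.zip ys) := by
  induction xs generalizing ys with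
  | nil => simp [pvCPL, pvPref]
  | cons x xs ih =>
    cases ys with
    | nil => simp [pvCPL, pvPref]
    | cons y ys => by_cases h : x = y <;> simp [pvCPL, pvPref, h, ih]

theorem pvZip_reverse (xs ys : List Char) (h : xs.length = ys.length) :
    xs.reverse.zip ys.reverse = (xs.zip ys).reverse := by
  induction xs generalizing ys with
  | nil => cases ys <;> simp_all
  | cons x xs ih =>
    cases ys with
    | nil => simp_all
    | cons y ys =>
      simp only [List.length_cons, Nat.add_right_cancel_iff] at h
      rw [List.reverse_cons, List.reverse_cons,
          List.zip_append (by simpa using h), ih ys h]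
      simp

theorem pvPref_le (ps : List (Char × Char)) : pvPref ps ≤ ps.length := by
  induction ps with
  | nil => simp [pvPref]
  | cons p r ih => obtain ⟨c1, c2⟩ := p; by_cases h : c1 = c2 <;> simp [pvPref, h] <;> omega

theorem pvPref_eq_length_iff (ps : List (Char × Char)) :
    pvPref ps = ps.length ↔ ∀ p ∈ ps, p.1 = p.2 := by
  induction ps with
  | nil => simp [pvPref]
  | cons p r ih =>
    obtain ⟨c1, c2⟩ := p
    by_cases h : c1 = c2 <;> simp [pvPref, h, ih]

theorem pvDiffs_eq_nil_iff (ps : List (Char × Char)) (s : Int) :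
    pvDiffs ps s = [] ↔ ∀ p ∈ ps, p.1 = p.2 := by
  induction ps generalizing s with
  | nil => simp [pvDiffs]
  | cons p r ih =>
    obtain ⟨c1, c2⟩ := p
    by_cases h : c1 = c2 <;> simp [pvDiffs, h, ih]

theorem pvPref_append (xs ys : List (Char × Char)) :
    pvPref (xs ++ ys) = if pvPref xs = xs.length then xs.length + pvPref ys else pvPref xs := by
  induction xs with
  | nil => simp [pvPref]
  | cons p r ih =>
    obtain ⟨c1, c2⟩ := p
    by_cases h : c1 = c2
    · have := pvPref_le r
      by_cases h2 : pvPref r = r.length <;> simp [pvPref, h, ih, h2] <;> omega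
    · simp [pvPref, h]

-- once pos is a real index (≠ -1), A returns -1 iff any further mismatch exists
theorem pvGoA_set (ps : List (Char × Char)) (s pos : Int) (h : pos ≠ -1) :
    pvGoA (PySem.List.enumerate ps s) pos = if pvDiffs ps s = [] then pos else -1 := by
  induction ps generalizing s with
  | nil => simp [PySem.List.enumerate_nil, pvGoA, pvDiffs]
  | cons p rest ih =>
    obtain ⟨c1, c2⟩ := p
    rw [PySem.List.enumerate_cons]
    by_cases hc : c1 = c2 <;> simp [pvGoA, pvDiffs, hc, h, ih]

-- A computes the unique-differing-index form
theorem pvGoA_eq (ps : List (Char × Char)) (s : Int) (hs : 0 ≤ s) :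
    pvGoA (PySem.List.enumerate ps s) (-1) = pvDForm ps s := by
  induction ps generalizing s with
  | nil => simp [PySem.List.enumerate_nil, pvGoA, pvDForm, pvDiffs]
  | cons p rest ih =>
    obtain ⟨c1, c2⟩ := p
    rw [PySem.List.enumerate_cons]
    by_cases hc : c1 = c2
    · simpa [pvGoA, pvDForm, pvDiffs, hc] using ih (s + 1) (by omega)
    · have hpos : s ≠ -1 := by omega
      simp only [pvGoA, if_pos (by simpa using hc)]
      rw [if_neg (by simp), pvGoA_set rest (s + 1) s hpos]
      rcases hD : pvDiffs rest (s + 1) with _ | ⟨q, qs⟩ <;>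
        simp [pvDForm, pvDiffs, hc, hD]

-- B's prefix/suffix decision computes the same form
theorem pvB_eq (ps : List (Char × Char)) (s : Int) (hs : 0 ≤ s) :
    (if pvPref ps = ps.length then (-1 : Int)
     else if (pvPref ps : Int) + (pvPref ps.reverse : Int) = (ps.length : Int) - 1
       then s + (pvPref ps : Int) else -1) = pvDForm ps s := by
  induction ps generalizing s with
  | nil => simp [pvPref, pvDForm, pvDiffs]
  | cons p rest ih =>
    obtain ⟨c1, c2⟩ := p
    have key : pvPref rest.reverse = rest.length ↔ pvDiffs rest (s + 1) = [] := by
      rw [pvDiffs_eq_nil_iff, show rest.length = rest.reverse.length by simp,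
          pvPref_eq_length_iff]
      constructor <;> exact fun h q hq => h q (by simpa using hq)
    have key0 : pvPref rest = rest.length ↔ pvDiffs rest (s + 1) = [] := by
      rw [pvDiffs_eq_nil_iff, pvPref_eq_length_iff]
    have hle := pvPref_le rest
    have hler : pvPref rest.reverse ≤ rest.length := by simpa using pvPref_le rest.reverse
    by_cases hc : c1 = c2
    · have hP : pvPref ((c1, c2) :: rest) = pvPref rest + 1 := by simp [pvPref, hc]
      have hD : pvDForm ((c1, c2) :: rest) s = pvDForm rest (s + 1) := by
        simp [pvDForm, pvDiffs, hc]
      have hApp : pvPref ((c1, c2) :: rest).reverse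
          = if pvPref rest.reverse = rest.length then rest.length + 1 else pvPref rest.reverse := by
        rw [List.reverse_cons, pvPref_append]
        simp [pvPref, hc]
      rw [hD, ← ih (s + 1) (by omega), hP, hApp, List.length_cons]
      have hab : (pvPref rest = rest.length) ↔ (pvPref rest.reverse = rest.length) :=
        key0.trans key.symm
      by_cases hfull : pvPref rest = rest.length
      · rw [if_pos (hab.1 hfull)]
        split_ifs <;> omega
      · rw [if_neg (fun h => hfull (hab.2 h))]
        split_ifs <;> omega
    · have hP : pvPref ((c1, c2) :: rest) = 0 := by simp [pvPref, hc]
      have hApp : pvPref ((c1, c2) :: rest).reverse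
          = if pvPref rest.reverse = rest.length then rest.length else pvPref rest.reverse := by
        rw [List.reverse_cons, pvPref_append]
        simp [pvPref, hc]
      have hD : pvDForm ((c1, c2) :: rest) s
          = if pvDiffs rest (s + 1) = [] then s else -1 := by
        rcases hE : pvDiffs rest (s + 1) with _ | ⟨q, qs⟩ <;> simp [pvDForm, pvDiffs, hc, hE]
      rw [hP, hApp, hD, List.length_cons]
      by_cases hnil : pvDiffs rest (s + 1) = []
      · simp [key.2 hnil, hnil]
      · have hb : ¬ pvPref rest.reverse = rest.length := fun h => hnil (key.1 h)
        simp [hb, hnil]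

-- ===== VERDICT (by name: the statement is the Claim_ definition above) =====
theorem matching_position_spec : Claim_equal_matching_position := by
  intro s1 s2 _
  unfold Spec_matching_position matching_position matching_position_alt
  have hzip : (s1.toList.take (min s1.toList.length s2.toList.length)).zip
      (s2.toList.take (min s1.toList.length s2.toList.length)) = s1.toList.zip s2.toList :=
    (List.zip_eq_zip_take_min).symm
  have hrev : (s1.toList.take (min s1.toList.length s2.toList.length)).reverse.zip
      (s2.toList.take (min s1.toList.length s2.toList.length)).reverse
      = (s1.toList.zip s2.toList).reverse := by
    rw [pvZip_reverse _ _ (by simp), hzip]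
  have hlen : (s1.toList.zip s2.toList).length = min s1.toList.length s2.toList.length := by
    simp
  rw [pvGoA_eq _ 0 le_rfl, ← pvB_eq _ 0 le_rfl]
  simp only [pvCPL_zip, hzip, hrev, hlen, zero_add]
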